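-- pv_equiv track=rewrite | github.com/hcgcarry/anomaly_detect | models/GDN/GDN.py | Construct_fullConnected_edge_index
-- ===== SOURCE A (Python) =====
-- def Construct_fullConnected_edge_index(startIndex,numOfNode,adjK):
--
--     node_i = []
--     node_j = []
--     fullRange = 51
--
--     for i in range(numOfNode):
--         node_i.extend([startIndex+i for x in range(adjK)])
--         node_j.extend([(startIndex+j)% fullRange for j in range(adjK)])
--
--
--     return node_i , node_j
-- ===== SOURCE B (Python) =====
-- def Construct_fullConnected_edge_index(startIndex, numOfNode, adjK):
--     # Single flat loop over all numOfNode*adjK edge slots; recover (node, neighbor)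
--     # from the flat index t by divmod, instead of nested per-node list building.
--     if numOfNode <= 0 or adjK <= 0:
--         return [], []
--     node_i = []
--     node_j = []
--     for t in range(numOfNode * adjK):
--         q, r = divmod(t, adjK)
--         node_i.append(startIndex + q)
--         node_j.append((startIndex + r) % 51)
--     return node_i, node_j
-- ===== Notes on version B (the rewrite author's own statement) =====
-- stated objective: alternative
-- what changed: Replaces A's nested per-node loop that extends two lists with per-node comprehensions by a single flat loop over all numOfNode*adjK edge slots, recovering each (node, neighbor) pair from the flat index by divmod.
import Mathlib
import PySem

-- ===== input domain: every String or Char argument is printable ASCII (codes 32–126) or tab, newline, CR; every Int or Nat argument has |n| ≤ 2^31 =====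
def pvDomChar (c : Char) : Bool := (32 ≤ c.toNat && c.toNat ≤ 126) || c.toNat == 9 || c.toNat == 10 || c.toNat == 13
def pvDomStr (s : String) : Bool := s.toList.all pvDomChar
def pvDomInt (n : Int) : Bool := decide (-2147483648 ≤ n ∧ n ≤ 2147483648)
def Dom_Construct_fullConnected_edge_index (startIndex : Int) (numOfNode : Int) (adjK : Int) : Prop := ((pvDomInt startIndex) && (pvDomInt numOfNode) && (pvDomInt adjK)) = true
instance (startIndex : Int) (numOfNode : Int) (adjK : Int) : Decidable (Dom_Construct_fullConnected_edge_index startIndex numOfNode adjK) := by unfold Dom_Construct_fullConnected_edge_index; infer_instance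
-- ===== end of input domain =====

-- B enumerates all numOfNode*adjK edge slots in ONE flat loop, recovering (node, neighbor)
-- from the flat index t by divmod, instead of A's nested per-node list extension.

-- ===== PORT A =====
-- literal port of A: loop over range(numOfNode), each step extending both accumulators
def Construct_fullConnected_edge_index (startIndex : Int) (numOfNode : Int) (adjK : Int) : List Int × List Int :=
  (PySem.List.pyRange 0 numOfNode 1).foldl
    (fun (acc : List Int × List Int) i =>
      (acc.1 ++ (PySem.List.pyRange 0 adjK 1).map (fun _ => startIndex + i),
       acc.2 ++ (PySem.List.pyRange 0 adjK 1).map (fun j => PySem.Int.mod (startIndex + j) 51)))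
    ([], [])

-- ===== PORT B =====
-- literal port of B: early return on non-positive counts, then one flat loop with divmod
def Construct_fullConnected_edge_index_alt (startIndex : Int) (numOfNode : Int) (adjK : Int) : List Int × List Int :=
  if numOfNode ≤ 0 ∨ adjK ≤ 0 then ([], [])
  else
    (PySem.List.pyRange 0 (numOfNode * adjK) 1).foldl
      (fun (acc : List Int × List Int) t =>
        (acc.1 ++ [startIndex + PySem.Int.floordiv t adjK],
         acc.2 ++ [PySem.Int.mod (startIndex + PySem.Int.mod t adjK) 51]))
      ([], [])

-- ===== PRECONDITION & SPEC =====
def Spec_Construct_fullConnected_edge_index (startIndex : Int) (numOfNode : Int) (adjK : Int) (out : List Int × List Int) : Prop := out = Construct_fullConnected_edge_index_alt startIndex numOfNode adjK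
instance (startIndex : Int) (numOfNode : Int) (adjK : Int) (out : List Int × List Int) : Decidable (Spec_Construct_fullConnected_edge_index startIndex numOfNode adjK out) := by unfold Spec_Construct_fullConnected_edge_index; infer_instance

-- ===== CLAIM (what is proved, stated in full; the proofs are below) =====
def Claim_equal_Construct_fullConnected_edge_index : Prop := ∀ (startIndex : Int) (numOfNode : Int) (adjK : Int), Dom_Construct_fullConnected_edge_index startIndex numOfNode adjK → Spec_Construct_fullConnected_edge_index startIndex numOfNode adjK (Construct_fullConnected_edge_index startIndex numOfNode adjK)

-- ===== LEMMAS AND PROOFS =====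

-- A's loop, generalized over the iterated list and the accumulator.
lemma foldA (s k : Int) (l : List Int) (a b : List Int) :
    l.foldl
      (fun (acc : List Int × List Int) i =>
        (acc.1 ++ (PySem.List.pyRange 0 k 1).map (fun _ => s + i),
         acc.2 ++ (PySem.List.pyRange 0 k 1).map (fun j => PySem.Int.mod (s + j) 51)))
      (a, b)
    = (a ++ (l.map (fun i => (PySem.List.pyRange 0 k 1).map (fun _ => s + i))).flatten,
       b ++ (List.replicate l.length
              ((PySem.List.pyRange 0 k 1).map (fun j => PySem.Int.mod (s + j) 51))).flatten) := by
  induction l generalizing a b with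
  | nil => simp
  | cons x xs ih =>
    simp only [List.foldl_cons, ih]
    simp [List.replicate_succ]

-- B's loop, generalized: appending a singleton per element is mapping.
lemma foldB (f g : Int → Int) (l : List Int) (a b : List Int) :
    l.foldl (fun (acc : List Int × List Int) t => (acc.1 ++ [f t], acc.2 ++ [g t])) (a, b)
    = (a ++ l.map f, b ++ l.map g) := by
  induction l generalizing a b with
  | nil => simp
  | cons x xs ih => simp [List.foldl_cons, ih]

-- floor-division / modulo of a flat index inside block m
lemma fdiv_block (m j k : Int) (hk : 0 < k) (hj0 : 0 ≤ j) (hjk : j < k) :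
    PySem.Int.floordiv (m * k + j) k = m := by
  rw [PySem.Int.floordiv_eq_iff_of_pos hk]
  constructor <;> nlinarith

lemma mod_block (m j k : Int) (hk : 0 < k) (hj0 : 0 ≤ j) (hjk : j < k) :
    PySem.Int.mod (m * k + j) k = j := by
  have h := PySem.Int.floordiv_mul_add_mod (m * k + j) k
  rw [fdiv_block m j k hk hj0 hjk] at h
  linarith

-- the flat enumeration of the first m blocks equals A's nested construction
lemma flat_blocks (s k : Int) (hk : 0 < k) (m : Nat) :
    ((PySem.List.pyRange 0 ((m : Int) * k) 1).map (fun t => s + PySem.Int.floordiv t k),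
     (PySem.List.pyRange 0 ((m : Int) * k) 1).map
       (fun t => PySem.Int.mod (s + PySem.Int.mod t k) 51))
    = (((PySem.List.pyRange 0 (m : Int) 1).map
          (fun i => (PySem.List.pyRange 0 k 1).map (fun _ => s + i))).flatten,
       (List.replicate m ((PySem.List.pyRange 0 k 1).map
          (fun j => PySem.Int.mod (s + j) 51))).flatten) := by
  induction m with
  | zero => simp [PySem.List.pyRange_zero]
  | succ m ih =>
    have hsplit : PySem.List.pyRange 0 (((m : Nat) + 1 : Int) * k) 1
        = PySem.List.pyRange 0 ((m : Int) * k) 1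
          ++ PySem.List.pyRange ((m : Int) * k) (((m : Nat) + 1 : Int) * k) 1 :=
      PySem.List.pyRange_one_append _ _ _ (by positivity) (by nlinarith)
    have htail : PySem.List.pyRange ((m : Int) * k) (((m : Nat) + 1 : Int) * k) 1
        = (PySem.List.pyRange 0 k 1).map (fun j => (m : Int) * k + j) := by
      rw [PySem.List.pyRange_one, PySem.List.pyRange_one]
      have : (((m : Nat) + 1 : Int) * k - (m : Int) * k).toNat = (k - 0).toNat := by
        congr 1; ring_nf
      rw [this, List.map_map]
      simp
    have hrep : PySem.List.pyRange 0 ((m : Nat) + 1 : Int) 1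
        = PySem.List.pyRange 0 (m : Int) 1 ++ [(m : Int)] :=
      PySem.List.pyRange_one_succ_right (by positivity)
    push_cast at hsplit hrep ⊢
    rw [hsplit, htail, hrep]
    simp only [List.map_append, List.map_map, List.flatten_append, List.replicate_succ']
    refine Prod.ext ?_ ?_ <;> simp only []
    · rw [Prod.mk.injEq] at ih
      rw [ih.1]
      congr 1
      simp only [List.map_cons, List.map_nil, List.flatten_cons, List.flatten_nil,
        List.append_nil]
      apply List.map_congr_left
      intro j hj
      have := PySem.List.mem_pyRange_one.mp hj
      simp only [Function.comp_apply]
      rw [fdiv_block m j k hk (by omega) (by omega)]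
    · rw [Prod.mk.injEq] at ih
      rw [ih.2]
      congr 1
      simp only [List.flatten_cons, List.flatten_nil, List.append_nil]
      apply List.map_congr_left
      intro j hj
      have := PySem.List.mem_pyRange_one.mp hj
      simp only [Function.comp_apply]
      rw [mod_block m j k hk (by omega) (by omega)]

-- ===== VERDICT (by name: the statement is the Claim_ definition above) =====
theorem Construct_fullConnected_edge_index_spec : Claim_equal_Construct_fullConnected_edge_index := by
  intro s n k _
  show Construct_fullConnected_edge_index s n k = Construct_fullConnected_edge_index_alt s n k
  unfold Construct_fullConnected_edge_index Construct_fullConnected_edge_index_alt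
  split_ifs with h
  · rcases h with h | h
    · rw [PySem.List.pyRange_one_eq_nil h]; rfl
    · rw [foldA]
      have hk : PySem.List.pyRange 0 k 1 = [] := PySem.List.pyRange_one_eq_nil h
      simp [hk]
  · push Not at h
    obtain ⟨hn, hk⟩ := h
    rw [foldA, foldB]
    have hm : n = ((n.toNat : Nat) : Int) := by omega
    have := flat_blocks s k hk n.toNat
    rw [hm]
    rw [Prod.mk.injEq] at this
    simp only [List.nil_append, PySem.List.length_pyRange_one, Int.sub_zero, Int.toNat_natCast]
    exact Prod.ext this.1.symm this.2.symm
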